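-- pv_equiv track=rewrite | github.com/hollomancer/sbir-analytics | scripts/fix_markdown.py | fix_code_fence_blank_lines
-- ===== SOURCE A (Python) =====
-- def fix_code_fence_blank_lines(content: str) -> str:
--     """Fix MD031: Fenced code blocks should be surrounded by blank lines."""
--     lines = content.split("\n")
--     result = []
--     in_code_block = False
--
--     for i, line in enumerate(lines):
--         is_code_fence = line.strip().startswith("```")
--         prev_line = lines[i - 1] if i > 0 else ""
--         next_line = lines[i + 1] if i < len(lines) - 1 else ""
--
--         # Add blank line before code fence if needed
--         if is_code_fence and not in_code_block:
--             if prev_line and not prev_line.strip() == "":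
--                 result.append("")
--
--         result.append(line)
--
--         # Add blank line after code fence if needed
--         if is_code_fence and in_code_block:
--             if next_line and not next_line.strip() == "":
--                 result.append("")
--
--         if is_code_fence:
--             in_code_block = not in_code_block
--
--     return "\n".join(result)
-- ===== SOURCE B (Python) =====
-- def fix_code_fence_blank_lines(content: str) -> str:
--     """Fix MD031: Fenced code blocks should be surrounded by blank lines."""
--     lines = content.split("\n")
--     fences = [ln.strip().startswith("```") for ln in lines]
--     # pref[i] = number of fence lines strictly before line i; a fence opens iff that count is even
--     pref = [0]
--     for f in fences:
--         pref.append(pref[-1] + (1 if f else 0))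
--
--     def emit(i):
--         line = lines[i]
--         if not fences[i]:
--             return [line]
--         if pref[i] % 2 == 0:  # opening fence: maybe blank line before
--             need_before = i > 0 and lines[i - 1].strip() != ""
--             return ([""] if need_before else []) + [line]
--         # closing fence: maybe blank line after
--         need_after = i + 1 < len(lines) and lines[i + 1].strip() != ""
--         return [line] + ([""] if need_after else [])
--
--     return "\n".join(x for i in range(len(lines)) for x in emit(i))
-- ===== Notes on version B (the rewrite author's own statement) =====
-- stated objective: alternative
-- what changed: Replaced A's single stateful loop (threaded in_code_block flag plus index lookbehind/lookahead) by staged passes: a classification pass marking fence lines, a prefix-count table whose parity tells open vs close, and a stateless per-index flatMap emission that decides each line independently from that table.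
import Mathlib
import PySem

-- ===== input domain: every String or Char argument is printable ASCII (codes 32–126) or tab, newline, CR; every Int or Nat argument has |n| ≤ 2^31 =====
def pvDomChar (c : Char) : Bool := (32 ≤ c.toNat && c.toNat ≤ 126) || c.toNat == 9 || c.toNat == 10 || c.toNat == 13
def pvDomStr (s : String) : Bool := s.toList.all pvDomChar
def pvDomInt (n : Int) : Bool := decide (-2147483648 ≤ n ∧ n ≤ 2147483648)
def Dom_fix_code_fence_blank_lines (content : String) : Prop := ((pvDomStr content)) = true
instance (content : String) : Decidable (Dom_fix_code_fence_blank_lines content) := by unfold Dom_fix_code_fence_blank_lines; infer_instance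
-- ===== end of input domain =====

-- B replaces A's single stateful loop by staged passes: a fence-classification list, a
-- prefix-count table (parity = open/close), and a stateless per-index flatMap emission;
-- objective: alternative decomposition.


-- ===== PORT A =====
-- one iteration of A's loop body (state: result so far, in_code_block)
def aStep (lines : List String) (st : List String × Bool) (p : Int × String) : List String × Bool :=
  let result := st.1
  let in_code_block := st.2
  let i := p.1
  let line := p.2
  let is_code_fence := PySem.Str.startswith (PySem.Str.strip line) "```"
  let prev_line := if 0 < i then PySem.List.pyGetD lines (i - 1) "" else ""
  let next_line := if i < (lines.length : Int) - 1 then PySem.List.pyGetD lines (i + 1) "" else ""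
  let result := if is_code_fence && !in_code_block then
      (if prev_line ≠ "" ∧ ¬ (PySem.Str.strip prev_line = "") then result ++ [""] else result)
    else result
  let result := result ++ [line]
  let result := if is_code_fence && in_code_block then
      (if next_line ≠ "" ∧ ¬ (PySem.Str.strip next_line = "") then result ++ [""] else result)
    else result
  (result, if is_code_fence then !in_code_block else in_code_block)

def fix_code_fence_blank_lines (content : String) : String :=
  let lines := (PySem.Str.split? content "\n").getD []
  let res := (PySem.List.enumerate lines 0).foldl (aStep lines) ([], false)
  PySem.Str.join "\n" res.1

-- ===== PORT B =====
def bFence (l : String) : Bool := PySem.Str.startswith (PySem.Str.strip l) "```"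

-- the prefix-count table: pref = [0]; for f in fences: pref.append(pref[-1] + (1 if f else 0))
def bPref (fences : List Bool) : List Nat :=
  fences.foldl (fun acc f => acc ++ [acc.getLastD 0 + (if f then 1 else 0)]) [0]

-- the stateless per-index emission of Source B's `emit`
def bEmit (lines : List String) (fences : List Bool) (pref : List Nat) (i : Nat) : List String :=
  let line := lines.getD i ""
  if !(fences.getD i false) then [line]
  else if pref.getD i 0 % 2 = 0 then
    (if decide (0 < i) && !(decide (PySem.Str.strip (lines.getD (i - 1) "") = "")) then [""] else []) ++ [line]
  else
    [line] ++ (if decide (i + 1 < lines.length) && !(decide (PySem.Str.strip (lines.getD (i + 1) "") = "")) then [""] else [])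

def fix_code_fence_blank_lines_alt (content : String) : String :=
  let lines := (PySem.Str.split? content "\n").getD []
  let fences := lines.map bFence
  let pref := bPref fences
  PySem.Str.join "\n" ((List.range lines.length).flatMap (bEmit lines fences pref))

-- ===== PRECONDITION & SPEC =====
def Spec_fix_code_fence_blank_lines (content : String) (out : String) : Prop := out = fix_code_fence_blank_lines_alt content
instance (content : String) (out : String) : Decidable (Spec_fix_code_fence_blank_lines content out) := by unfold Spec_fix_code_fence_blank_lines; infer_instance

-- ===== CLAIM (what is proved, stated in full; the proofs are below) =====
def Claim_equal_fix_code_fence_blank_lines : Prop := ∀ (content : String), Dom_fix_code_fence_blank_lines content → Spec_fix_code_fence_blank_lines content (fix_code_fence_blank_lines content)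

-- ===== LEMMAS AND PROOFS =====

-- A's loop rewritten as a structural recursion carrying the previous line;
-- next_line becomes the head of the remaining suffix.
def aRec (prev : String) (inc : Bool) : List String → List String
  | [] => []
  | l :: rest =>
    let fence := PySem.Str.startswith (PySem.Str.strip l) "```"
    let nxt := rest.headD ""
    (if fence && !inc then (if prev ≠ "" ∧ ¬ (PySem.Str.strip prev = "") then [""] else []) else []) ++
    [l] ++
    (if fence && inc then (if nxt ≠ "" ∧ ¬ (PySem.Str.strip nxt = "") then [""] else []) else []) ++
    aRec l (if fence then !inc else inc) rest

lemma strip_empty : PySem.Str.strip "" = "" := by decide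

lemma cond_iff (s : String) : (s ≠ "" ∧ ¬ (PySem.Str.strip s = "")) ↔ ¬ (PySem.Str.strip s = "") := by
  constructor
  · exact fun h => h.2
  · intro h
    refine ⟨?_, h⟩
    intro he
    exact h (he ▸ strip_empty)

lemma A_fold (lines : List String) : ∀ (suffix pre acc : List String) (inc : Bool),
    lines = pre ++ suffix →
    ((PySem.List.enumerate suffix (pre.length : Int)).foldl (aStep lines) (acc, inc)).1
      = acc ++ aRec (pre.getLastD "") inc suffix := by
  intro suffix
  induction suffix with
  | nil => intro pre acc inc _; simp [PySem.List.enumerate, aRec]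
  | cons l rest ih =>
    intro pre acc inc hl
    rw [PySem.List.enumerate_cons, List.foldl_cons]
    have hprev : (if 0 < (pre.length : Int) then PySem.List.pyGetD lines ((pre.length : Int) - 1) "" else "")
        = pre.getLastD "" := by
      cases pre with
      | nil => simp
      | cons p ps =>
        rw [if_pos (by exact_mod_cast Nat.succ_pos ps.length)]
        have hlt : ((p :: ps).length : Int) - 1 = (((p :: ps).length - 1 : Nat) : Int) := by
          simp only [List.length_cons]; push_cast; omega
        rw [hlt, PySem.List.pyGetD_natCast]
        subst hl
        rw [List.getD_eq_getElem?_getD, List.getElem?_append_left (by simp),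
          List.getLastD_eq_getLast?, List.getLast?_eq_getElem?]
    have hnext : (if (pre.length : Int) < (lines.length : Int) - 1 then PySem.List.pyGetD lines ((pre.length : Int) + 1) "" else "")
        = rest.headD "" := by
      subst hl
      cases rest with
      | nil =>
        rw [if_neg (by simp)]
        rfl
      | cons r rs =>
        rw [if_pos (by simp; omega)]
        have hc : ((pre.length : Int) + 1) = ((pre.length + 1 : Nat) : Int) := by push_cast; ring
        rw [hc, PySem.List.pyGetD_natCast]
        rw [List.getD_eq_getElem?_getD, List.getElem?_append_right (by omega)]
        simp
    have hstep : aStep lines (acc, inc) ((pre.length : Int), l)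
        = (acc ++ ((if PySem.Str.startswith (PySem.Str.strip l) "```" && !inc then
              (if pre.getLastD "" ≠ "" ∧ ¬ (PySem.Str.strip (pre.getLastD "") = "") then [""] else []) else []) ++
            [l] ++
            (if PySem.Str.startswith (PySem.Str.strip l) "```" && inc then
              (if rest.headD "" ≠ "" ∧ ¬ (PySem.Str.strip (rest.headD "") = "") then [""] else []) else [])),
           if PySem.Str.startswith (PySem.Str.strip l) "```" then !inc else inc) := by
      simp only [aStep, hprev, hnext]
      by_cases hf : PySem.Str.startswith (PySem.Str.strip l) "```" <;>
      cases inc <;>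
      split_ifs <;>
      simp_all [List.append_assoc]
    rw [hstep]
    have hl' : lines = (pre ++ [l]) ++ rest := by rw [hl]; simp
    have hlen : (pre.length : Int) + 1 = (((pre ++ [l]).length : Nat) : Int) := by simp
    rw [hlen, ih (pre ++ [l]) _ _ hl']
    simp [aRec, List.append_assoc]

-- the running-count characterisation of Source B's prefix table
def prefList (c : Nat) : List Bool → List Nat
  | [] => []
  | f :: fs => (c + (if f then 1 else 0)) :: prefList (c + (if f then 1 else 0)) fs

lemma bPref_fold (fs : List Bool) : ∀ (acc : List Nat) (c : Nat),
    fs.foldl (fun acc f => acc ++ [acc.getLastD 0 + (if f then 1 else 0)]) (acc ++ [c])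
      = acc ++ [c] ++ prefList c fs := by
  induction fs with
  | nil => intro acc c; simp [prefList]
  | cons f rest ih =>
    intro acc c
    rw [List.foldl_cons]
    have h1 : (acc ++ [c]).getLastD 0 = c := by simp
    rw [h1]
    have h2 : acc ++ [c] ++ [c + (if f then 1 else 0)] = (acc ++ [c]) ++ [c + (if f then 1 else 0)] := by
      simp
    rw [h2, ih (acc ++ [c]) (c + (if f then 1 else 0))]
    simp [prefList, List.append_assoc]

lemma prefList_getD (fs : List Bool) : ∀ (i c : Nat),
    (c :: prefList c fs).getD i 0 = if i ≤ fs.length then c + (fs.take i).count true else 0 := by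
  induction fs with
  | nil =>
    intro i c
    cases i <;> simp [prefList]
  | cons f rest ih =>
    intro i c
    cases i with
    | zero => simp
    | succ j =>
      simp only [prefList, List.getD_cons_succ, ih j, List.length_cons, List.take_succ_cons,
        List.count_cons]
      by_cases h : j ≤ rest.length
      · simp only [if_pos h, if_pos (show j + 1 ≤ rest.length + 1 by omega)]
        cases f <;> · simp <;> omega
      · simp only [if_neg h, if_neg (show ¬ j + 1 ≤ rest.length + 1 by omega)]


lemma bPref_getD (fs : List Bool) (i : Nat) (h : i ≤ fs.length) :
    (bPref fs).getD i 0 = (fs.take i).count true := by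
  have := bPref_fold fs [] 0
  simp only [List.nil_append] at this
  unfold bPref
  rw [this, List.singleton_append, prefList_getD, if_pos h]
  omega

-- B's stateless emission over indices equals A's stateful recursion
lemma B_emit (lines : List String) : ∀ (suffix pre : List String),
    lines = pre ++ suffix →
    (List.range' pre.length suffix.length).flatMap (bEmit lines (lines.map bFence) (bPref (lines.map bFence)))
      = aRec (pre.getLastD "") (decide (((lines.map bFence).take pre.length).count true % 2 = 1)) suffix := by
  intro suffix
  induction suffix with
  | nil => intro pre _; simp [aRec]
  | cons l rest ih =>
    intro pre hl
    subst hl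
    rw [List.length_cons, List.range'_succ, List.flatMap_cons]
    have hline : (pre ++ l :: rest).getD pre.length "" = l := by
      rw [List.getD_eq_getElem?_getD, List.getElem?_append_right (le_refl _)]; simp
    have hfence : ((pre ++ l :: rest).map bFence).getD pre.length false = bFence l := by
      rw [List.getD_eq_getElem?_getD, List.getElem?_map, List.getElem?_append_right (le_refl _)]
      simp
    have hpar : (bPref ((pre ++ l :: rest).map bFence)).getD pre.length 0
        = (((pre ++ l :: rest).map bFence).take pre.length).count true :=
      bPref_getD _ _ (by simp)
    have hprev : (if decide (0 < pre.length) && !(decide (PySem.Str.strip ((pre ++ l :: rest).getD (pre.length - 1) "") = "")) then ([""]:List String) else [])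
        = (if ¬ (PySem.Str.strip (pre.getLastD "") = "") then [""] else []) := by
      cases pre with
      | nil => simp [strip_empty]
      | cons p ps =>
        have hg : ((p :: ps) ++ l :: rest).getD ((p :: ps).length - 1) "" = (p :: ps).getLastD "" := by
          rw [List.getD_eq_getElem?_getD, List.getElem?_append_left (by simp),
            List.getLastD_eq_getLast?, List.getLast?_eq_getElem?]
        rw [hg]
        simp
    have hnext : (if decide (pre.length + 1 < ((pre ++ l :: rest)).length) && !(decide (PySem.Str.strip ((pre ++ l :: rest).getD (pre.length + 1) "") = "")) then ([""]:List String) else [])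
        = (if rest.headD "" ≠ "" ∧ ¬ (PySem.Str.strip (rest.headD "") = "") then [""] else []) := by
      cases rest with
      | nil => simp [strip_empty]
      | cons r rs =>
        have hg : ((pre ++ l :: r :: rs).getD (pre.length + 1) "") = r := by
          rw [List.getD_eq_getElem?_getD, List.getElem?_append_right (by omega)]
          simp
        rw [hg]
        have hlt : pre.length + 1 < (pre ++ l :: r :: rs).length := by
          simp only [List.length_append, List.length_cons]
          omega
        simp only [hlt, decide_true, Bool.true_and, List.headD_cons]
        by_cases hr : PySem.Str.strip r = ""
        · simp [hr]
        · rw [if_pos (by simpa using hr), if_pos ((cond_iff r).2 hr)]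
    have hrest : (List.range' (pre.length + 1) rest.length).flatMap (bEmit (pre ++ l :: rest) ((pre ++ l :: rest).map bFence) (bPref ((pre ++ l :: rest).map bFence)))
        = aRec l (decide ((((pre ++ l :: rest).map bFence).take (pre.length + 1)).count true % 2 = 1)) rest := by
      have h := ih (pre ++ [l]) (by simp)
      simp only [List.length_append, List.length_cons, List.length_nil, List.getLastD_concat] at h
      exact h
    have htake : (((pre ++ l :: rest).map bFence).take (pre.length + 1)).count true
        = (((pre ++ l :: rest).map bFence).take pre.length).count true + (if bFence l then 1 else 0) := by
      have t1 : List.take (pre.length + 1) (pre.map bFence) = pre.map bFence :=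
        List.take_of_length_le (by simp)
      have t2 : List.take pre.length (pre.map bFence) = pre.map bFence :=
        List.take_of_length_le (by simp)
      rw [List.map_append, List.take_append, List.take_append, t1, t2]
      simp only [List.length_map, Nat.add_sub_cancel_left, Nat.sub_self, List.map_cons,
        List.take_succ_cons, List.take_zero, List.count_append, List.count_cons, List.count_nil]
      cases h : bFence l <;> simp
    rw [hrest, htake]
    simp only [bEmit, hline, hfence, hpar]
    set cnt := (((pre ++ l :: rest).map bFence).take pre.length).count true with hcnt
    by_cases hf : bFence l = true
    · have hf' : PySem.Str.startswith (PySem.Str.strip l) "```" = true := hf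
      have htog : (decide ((cnt + (if bFence l then 1 else 0)) % 2 = 1)) = !(decide (cnt % 2 = 1)) := by
        simp only [hf, if_true]
        by_cases h2 : cnt % 2 = 1
        · simp only [h2, decide_true, Bool.not_true, decide_eq_false_iff_not]
          omega
        · simp only [h2, decide_false, Bool.not_false, decide_eq_true_eq]
          omega
      rw [htog]
      simp only [aRec, hf']
      by_cases h2 : cnt % 2 = 1
      · -- closing fence
        simp only [h2, decide_true, Bool.not_true, Bool.and_false, Bool.and_true]
        rw [if_neg (by rw [hf]; simp), if_neg (by omega), hnext]
        simp
      · -- opening fence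
        have he : cnt % 2 = 0 := by omega
        simp only [h2, decide_false, Bool.not_false, Bool.and_true, Bool.and_false]
        rw [if_neg (by rw [hf]; simp), if_pos he, hprev]
        simp
        by_cases hp : PySem.Str.strip (pre.getLast?.getD "") = ""
        · simp [hp]
        · simp [hp, (cond_iff (pre.getLast?.getD "")).2 hp]
    · have hf0 : bFence l = false := by simpa using hf
      have hf' : PySem.Str.startswith (PySem.Str.strip l) "```" = false := hf0
      rw [hf0]
      simp only [aRec, hf', Bool.false_and]
      simp

-- ===== VERDICT (by name: the statement is the Claim_ definition above) =====
theorem fix_code_fence_blank_lines_spec : Claim_equal_fix_code_fence_blank_lines := by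
  intro content _
  unfold Spec_fix_code_fence_blank_lines
  simp only [fix_code_fence_blank_lines, fix_code_fence_blank_lines_alt]
  have hA := A_fold ((PySem.Str.split? content "\n").getD []) ((PySem.Str.split? content "\n").getD []) [] [] false (by simp)
  simp only [List.length_nil, Nat.cast_zero] at hA
  rw [hA]
  have hB := B_emit ((PySem.Str.split? content "\n").getD []) ((PySem.Str.split? content "\n").getD []) [] (by simp)
  rw [List.range_eq_range']
  simp only [List.length_nil] at hB
  rw [hB]
  simp
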